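-- pv_equiv track=rewrite | github.com/Alyxion/llming-stage | llming_stage/asset_server.py | validate_relative_path
-- ===== SOURCE A (Python) =====
-- _FORBIDDEN_SUBSTRINGS: tuple[str, ...] = ("..", "\\", "\x00")
--
-- def validate_relative_path(path: str) -> str | None:
--     """Return the cleaned path, or ``None`` if the input is unsafe.
--
--     Applies only textual checks — the caller must still resolve against a
--     root and verify containment (see :func:`resolve_under_root`).
--     """
--     if not path:
--         return None
--     if path.startswith("/"):
--         return None
--     for bad in _FORBIDDEN_SUBSTRINGS:
--         if bad in path:
--             return None
--     for ch in path:
--         code = ord(ch)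
--         if code < 0x20 or code == 0x7F:
--             return None
--     for segment in path.split("/"):
--         if not segment or segment in (".", ".."):
--             return None
--     return path
-- ===== SOURCE B (Python) =====
-- def validate_relative_path(path: str) -> str | None:
--     """Single-pass scan: one walk over the characters with a small state
--     (previous-char-was-dot, current segment length, segment-is-single-dot)
--     replaces A's multiple substring/character/split passes."""
--     if not path:
--         return None
--     prev_dot = False
--     seg_len = 0
--     seg_is_dot = False
--     for ch in path:
--         code = ord(ch)
--         if code < 0x20 or code == 0x7F or ch == "\\":
--             return None
--         if ch == ".":
--             if prev_dot:
--                 return None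
--             seg_is_dot = seg_len == 0
--             seg_len += 1
--             prev_dot = True
--         elif ch == "/":
--             if seg_len == 0 or seg_is_dot:
--                 return None
--             seg_len = 0
--             seg_is_dot = False
--             prev_dot = False
--         else:
--             seg_len += 1
--             seg_is_dot = False
--             prev_dot = False
--     if seg_len == 0 or seg_is_dot:
--         return None
--     return path
-- ===== Notes on version B (the rewrite author's own statement) =====
-- stated objective: alternative
-- what changed: Replaced A's four separate passes (substring scans, per-char control-code scan, split-into-segments scan) by one single left-to-right pass keeping a three-field state (previous char was '.', current segment length, current segment is a lone '.').
import Mathlib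
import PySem

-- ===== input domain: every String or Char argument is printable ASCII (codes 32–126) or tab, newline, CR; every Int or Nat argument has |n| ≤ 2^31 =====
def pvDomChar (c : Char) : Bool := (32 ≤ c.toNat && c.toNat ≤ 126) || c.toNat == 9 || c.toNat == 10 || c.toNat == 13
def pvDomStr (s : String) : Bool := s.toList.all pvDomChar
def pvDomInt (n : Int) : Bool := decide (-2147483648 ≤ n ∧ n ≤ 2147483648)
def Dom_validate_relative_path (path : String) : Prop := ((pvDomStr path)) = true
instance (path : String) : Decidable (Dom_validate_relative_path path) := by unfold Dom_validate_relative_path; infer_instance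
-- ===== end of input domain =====

-- B replaces A's several scans (substring checks, control-char scan, split into segments)
-- by one single pass over the characters with a small state; same return value everywhere.

-- ===== PORT A =====
-- `_FORBIDDEN_SUBSTRINGS`; the str segments/substrings are ported as char lists
-- (exact: PySem.Str.isIn/split? are the Chars versions under toList/ofList)
def pvForbidden : List (List Char) := [['.', '.'], ['\\'], ['\x00']]

def validate_relative_path (path : String) : Option String :=
  if path = "" then none
  else if PySem.Str.startswith path "/" then none
  else if pvForbidden.any (fun bad => PySem.Chars.isIn bad path.toList) then none
  else if path.toList.any (fun ch => ch.toNat < 0x20 || ch.toNat == 0x7F) then none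
  else if (PySem.Chars.splitOn path.toList ['/']).any
            (fun seg => seg.isEmpty || seg = ['.'] || seg = ['.', '.']) then none
  else some path

-- ===== PORT B =====
-- the loop of Source B: state = (prev_dot, seg_len, seg_is_dot); returns true iff no `return None` fires
def pvScanB : List Char → Bool → Nat → Bool → Bool
  | [], _, segLen, segDot => !(segLen == 0 || segDot)
  | c :: rest, prevDot, segLen, segDot =>
    if c.toNat < 0x20 || c.toNat == 0x7F || c = '\\' then false
    else if c = '.' then
      if prevDot then false
      else pvScanB rest true (segLen + 1) (segLen == 0)
    else if c = '/' then
      if segLen == 0 || segDot then false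
      else pvScanB rest false 0 false
    else pvScanB rest false (segLen + 1) false

def validate_relative_path_alt (path : String) : Option String :=
  if path = "" then none
  else if pvScanB path.toList false 0 false then some path
  else none

-- ===== PRECONDITION & SPEC =====
def Spec_validate_relative_path (path : String) (out : Option String) : Prop := out = validate_relative_path_alt path
instance (path : String) (out : Option String) : Decidable (Spec_validate_relative_path path out) := by unfold Spec_validate_relative_path; infer_instance

-- ===== CLAIM (what is proved, stated in full; the proofs are below) =====
def Claim_equal_validate_relative_path : Prop := ∀ (path : String), Dom_validate_relative_path path → Spec_validate_relative_path path (validate_relative_path path)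

-- ===== LEMMAS AND PROOFS =====

-- a character B's scan lets through
def pvAllowed (c : Char) : Bool := !(c.toNat < 0x20 || c.toNat == 0x7F || c = '\\')

-- the '/'-segments of `cur.reverse ++ l` (cur = pending segment, reversed)
def pvSegs : List Char → List Char → List (List Char)
  | cur, [] => [cur.reverse]
  | cur, c :: t => if c = '/' then cur.reverse :: pvSegs [] t else pvSegs (c :: cur) t

-- no two consecutive dots in l, given that the char before l was a dot iff p
def pvNoDD : Bool → List Char → Bool
  | _, [] => true
  | p, c :: t => if c = '.' then (!p && pvNoDD true t) else pvNoDD false t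

def pvGoodSeg (s : List Char) : Bool := !s.isEmpty && !(decide (s = ['.']))

theorem pvSegs_mem_infix : ∀ (l cur s : List Char), s ∈ pvSegs cur l → s <:+: (cur.reverse ++ l) := by
  intro l
  induction l with
  | nil =>
    intro cur s hs
    simp [pvSegs] at hs
    subst hs; simp
  | cons c t ih =>
    intro cur s hs
    by_cases hc : c = '/'
    · subst hc
      simp [pvSegs] at hs
      rcases hs with h | h
      · subst h; exact (List.prefix_append _ _).isInfix
      · exact ((ih [] s h).trans ⟨cur.reverse ++ ['/'], [], by simp⟩)
    · simp [pvSegs, hc] at hs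
      have := ih (c :: cur) s hs
      simpa using this

theorem pvNoDD_iff : ∀ (l : List Char) (p : Bool),
    pvNoDD p l = true ↔ (¬ ['.', '.'] <:+: l ∧ (p = true → ¬ ['.'] <+: l)) := by
  intro l
  induction l with
  | nil => intro p; simp [pvNoDD]
  | cons c t ih =>
    intro p
    by_cases hc : c = '.'
    · subst hc
      have e : pvNoDD p ('.' :: t) = (!p && pvNoDD true t) := by simp [pvNoDD]
      rw [e]
      cases p with
      | false =>
        rw [Bool.not_false, Bool.true_and, ih]
        constructor
        · rintro ⟨hdd, hpre⟩
          refine ⟨?_, by simp⟩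
          rw [List.infix_cons_iff]
          rintro (h | h)
          · exact hpre rfl (List.cons_prefix_cons.mp h).2
          · exact hdd h
        · rintro ⟨hdd, _⟩
          exact ⟨fun h => hdd (List.infix_cons_iff.mpr (Or.inr h)),
                 fun _ h => hdd (List.infix_cons_iff.mpr (Or.inl (List.cons_prefix_cons.mpr ⟨rfl, h⟩)))⟩
      | true =>
        rw [Bool.not_true, Bool.false_and]
        constructor
        · intro h; cases h
        · rintro ⟨_, h⟩
          exact absurd (List.cons_prefix_cons.mpr ⟨rfl, List.nil_prefix⟩) (h rfl)
    · have e : pvNoDD p (c :: t) = pvNoDD false t := by simp [pvNoDD, hc]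
      rw [e, ih]
      constructor
      · rintro ⟨hdd, _⟩
        refine ⟨?_, ?_⟩
        · rw [List.infix_cons_iff]
          rintro (h | h)
          · exact hc (List.cons_prefix_cons.mp h).1.symm
          · exact hdd h
        · intro _ h
          exact hc (List.cons_prefix_cons.mp h).1.symm
      · rintro ⟨hdd, _⟩
        refine ⟨fun h => hdd (List.infix_cons_iff.mpr (Or.inr h)), by simp⟩

theorem pvScanB_eq : ∀ (l cur : List Char) (p : Bool) (n : Nat) (d : Bool),
    p = decide (cur.head? = some '.') → n = cur.length → d = decide (cur = ['.']) →
    pvScanB l p n d =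
      (l.all pvAllowed && pvNoDD (decide (cur.head? = some '.')) l
        && (pvSegs cur l).all pvGoodSeg) := by
  intro l
  induction l with
  | nil =>
    intro cur p n d hp hn hd
    subst hp; subst hn; subst hd
    simp only [pvScanB, pvSegs, pvNoDD, List.all_nil, List.all_cons, pvGoodSeg,
      Bool.true_and, Bool.and_true]
    rcases cur with _ | ⟨a, cur⟩
    · simp
    · by_cases hb : cur = []
      · subst hb; by_cases ha : a = '.' <;> simp [ha]
      · have hne : cur.reverse ++ [a] ≠ ['.'] := by
          intro h
          have := congrArg List.length h
          simp at this
          exact hb this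
        simp [hne, hb]
  | cons c t ih =>
    intro cur p n d hp hn hd
    subst hp; subst hn; subst hd
    by_cases ha : (decide (c.toNat < 0x20) || c.toNat == 0x7F || decide (c = '\\')) = true
    · have hbad : pvAllowed c = false := by simp only [pvAllowed, ha, Bool.not_true]
      have e : pvScanB (c :: t) (decide (cur.head? = some '.')) cur.length (decide (cur = ['.'])) = false := by
        simp [pvScanB, ha]
      rw [e]
      simp [hbad]
    · have ha' : (decide (c.toNat < 0x20) || c.toNat == 0x7F || decide (c = '\\')) = false :=
        Bool.not_eq_true _ ▸ Bool.eq_false_iff.mpr ha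
      have hall : pvAllowed c = true := by simp only [pvAllowed, ha', Bool.not_false]
      by_cases hc : c = '.'
      · subst hc
        by_cases hprev : cur.head? = some '.'
        · have e : pvScanB ('.' :: t) (decide (cur.head? = some '.')) cur.length (decide (cur = ['.'])) = false := by
            simp [pvScanB, hprev]
          rw [e]
          simp [pvNoDD, hprev]
        · have e : pvScanB ('.' :: t) (decide (cur.head? = some '.')) cur.length (decide (cur = ['.']))
              = pvScanB t true (cur.length + 1) (cur.length == 0) := by
            simp [pvScanB, hprev]
          rw [e, ih ('.' :: cur) true (cur.length + 1) (cur.length == 0) (by simp)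
              (by simp) (by rcases cur <;> simp)]
          simp [pvSegs, pvNoDD, hprev, hall, Bool.and_assoc]
      · by_cases hs : c = '/'
        · subst hs
          by_cases hz : ((cur.length == 0 : Bool) || decide (cur = ['.'])) = true
          · have hbadseg : pvGoodSeg cur.reverse = false := by
              rcases cur with _ | ⟨a, cur⟩
              · simp [pvGoodSeg]
              · simp only [List.length_cons, Nat.add_eq_zero_iff, beq_iff_eq, Bool.or_eq_true,
                  decide_eq_true_eq] at hz
                rcases hz with h | h
                · omega
                · rw [h]; simp [pvGoodSeg]
            have e : pvScanB ('/' :: t) (decide (cur.head? = some '.')) cur.length (decide (cur = ['.'])) = false := by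
              simp [pvScanB, hz]
            rw [e]
            simp [pvSegs, pvNoDD, hbadseg]
          · have hz' : ((cur.length == 0 : Bool) || decide (cur = ['.'])) = false :=
              Bool.eq_false_iff.mpr hz
            have hgoodseg : pvGoodSeg cur.reverse = true := by
              simp only [Bool.or_eq_false_iff, beq_eq_false_iff_ne, ne_eq,
                decide_eq_false_iff_not] at hz'
              have hne : cur ≠ [] := fun h => hz'.1 (by simp [h])
              have hne2 : cur.reverse ≠ ['.'] := by
                intro h
                apply hz'.2
                have := congrArg List.reverse h
                simpa using this
              simp [pvGoodSeg, hne, hne2]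
            have e : pvScanB ('/' :: t) (decide (cur.head? = some '.')) cur.length (decide (cur = ['.']))
                = pvScanB t false 0 false := by
              simp [pvScanB, hz']
            rw [e, ih [] false 0 false (by simp) rfl (by simp)]
            simp [pvSegs, pvNoDD, hall, hgoodseg, Bool.and_assoc]
        · have e : pvScanB (c :: t) (decide (cur.head? = some '.')) cur.length (decide (cur = ['.']))
              = pvScanB t false (cur.length + 1) false := by
            simp [pvScanB, ha', hc, hs]
          rw [e, ih (c :: cur) false (cur.length + 1) false (by simp [hc]) rfl (by simp [hc])]
          simp [pvSegs, pvNoDD, hs, hc, hall, Bool.and_assoc]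

theorem pvSplitOn_go : ∀ (fuel : Nat) (l cur : List Char) (acc : List (List Char)),
    l.length < fuel →
    PySem.Chars.splitOn.go ['/'] fuel l cur acc = acc.reverse ++ pvSegs cur l := by
  intro fuel
  induction fuel with
  | zero => intro l cur acc h; omega
  | succ f ih =>
    intro l cur acc h
    rcases l with _ | ⟨c, rest⟩
    · simp [PySem.Chars.splitOn.go, pvSegs]
    · by_cases hc : c = '/'
      · subst hc
        have hpre : (['/'] : List Char).isPrefixOf ('/' :: rest) = true := by
          simp [List.isPrefixOf]
        rw [show PySem.Chars.splitOn.go ['/'] (f + 1) ('/' :: rest) cur acc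
            = PySem.Chars.splitOn.go ['/'] f (List.drop 1 ('/' :: rest)) [] (cur.reverse :: acc) from by
          simp [PySem.Chars.splitOn.go, hpre]]
        simp only [List.drop_succ_cons, List.drop_zero]
        rw [ih rest [] (cur.reverse :: acc) (by simpa using h)]
        simp [pvSegs]
      · have hpre : (['/'] : List Char).isPrefixOf (c :: rest) = false := by
          simp [List.isPrefixOf]
          exact fun h => absurd h.symm hc
        rw [show PySem.Chars.splitOn.go ['/'] (f + 1) (c :: rest) cur acc
            = PySem.Chars.splitOn.go ['/'] f rest (c :: cur) acc from by
          simp [PySem.Chars.splitOn.go, hpre]]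
        rw [ih rest (c :: cur) acc (by simp at h ⊢; omega)]
        simp [pvSegs, hc]

theorem pvSplitOn_eq (l : List Char) : PySem.Chars.splitOn l ['/'] = pvSegs [] l := by
  rw [PySem.Chars.splitOn, pvSplitOn_go (l.length + 1) l [] [] (by omega)]
  simp

theorem pvSingleton_infix {a : Char} {l : List Char} : [a] <:+: l ↔ a ∈ l := by
  constructor
  · intro h; exact h.subset (by simp)
  · intro h
    obtain ⟨s, t, rfl⟩ := List.append_of_mem h
    exact ⟨s, t, by simp⟩

theorem pvAllowed_iff (c : Char) : pvAllowed c = true ↔ (¬ c.toNat < 32 ∧ c.toNat ≠ 127 ∧ c ≠ '\\') := by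
  simp [pvAllowed]; tauto

theorem validate_relative_path_spec : Claim_equal_validate_relative_path := by
  intro path _
  unfold Spec_validate_relative_path validate_relative_path validate_relative_path_alt
  by_cases h0 : path = ""
  · simp [h0]
  · rw [if_neg h0, if_neg h0]
    have hscan := pvScanB_eq path.toList [] false 0 false (by simp) rfl (by simp)
    simp only [List.head?_nil, reduceCtorEq, decide_false] at hscan
    rcases hq : pvScanB path.toList false 0 false with _ | _
    -- B rejects: show A rejects too (the last A-branch is impossible)
    · rw [hq] at hscan
      simp only [Bool.false_eq_true, if_false]
      split_ifs with hsw hforb hchar hseg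
      · rfl
      · rfl
      · rfl
      · rfl
      · exfalso
        have hforbF : (pvForbidden.any fun bad => PySem.Chars.isIn bad path.toList) = false :=
          Bool.eq_false_iff.mpr hforb
        simp only [pvForbidden, List.any_cons, List.any_nil, Bool.or_false,
          Bool.or_eq_false_iff] at hforbF
        obtain ⟨hf1, hf2, hf3⟩ := hforbF
        have hcharF := Bool.eq_false_iff.mpr hchar
        have hsegF := Bool.eq_false_iff.mpr hseg
        rw [List.any_eq_false] at hcharF hsegF
        have hall : path.toList.all pvAllowed = true := by
          rw [List.all_eq_true]
          intro c hcmem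
          have h1 := hcharF c hcmem
          simp only [Bool.or_eq_true, not_or, decide_eq_true_eq, beq_iff_eq] at h1
          rw [pvAllowed_iff]
          refine ⟨h1.1, h1.2, fun he => ?_⟩
          rw [PySem.Chars.isIn_eq_false_iff] at hf2
          exact hf2 (pvSingleton_infix.mpr (he ▸ hcmem))
        have hdd : pvNoDD false path.toList = true := by
          rw [pvNoDD_iff]
          refine ⟨?_, by simp⟩
          rw [PySem.Chars.isIn_eq_false_iff] at hf1
          exact hf1
        have hsegs : (pvSegs [] path.toList).all pvGoodSeg = true := by
          rw [List.all_eq_true]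
          intro s hsmem
          have := hsegF s (by rw [pvSplitOn_eq]; exact hsmem)
          simp only [Bool.or_eq_true, not_or, List.isEmpty_iff, decide_eq_true_eq] at this
          simp [pvGoodSeg, this.1.1, this.1.2]
        rw [hall, hdd, hsegs] at hscan
        simp at hscan
    -- B accepts: show every A-check is false
    · rw [hq] at hscan
      rw [if_pos rfl]
      have hconj := hscan.symm
      simp only [Bool.and_eq_true, List.all_eq_true] at hconj
      obtain ⟨⟨hall, hdd⟩, hsegs⟩ := hconj
      have hnodd := (pvNoDD_iff path.toList false).mp hdd
      have hnosw : PySem.Chars.startswith path.toList ['/'] = false := by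
        rcases hh : path.toList with _ | ⟨c, t⟩
        · exact absurd (by simpa using congrArg String.ofList hh) h0
        · by_cases hc : c = '/'
          · exfalso
            have := hsegs [] (by rw [hh, hc]; simp [pvSegs])
            simp [pvGoodSeg] at this
          · rw [Bool.eq_false_iff]
            intro hw
            rw [PySem.Chars.startswith_iff] at hw
            exact hc (List.cons_prefix_cons.mp hw).1.symm
      have hforb : pvForbidden.any (fun bad => PySem.Chars.isIn bad path.toList) = false := by
        simp only [pvForbidden, List.any_cons, List.any_nil, Bool.or_false,
          Bool.or_eq_false_iff]
        refine ⟨?_, ?_, ?_⟩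
        · rw [PySem.Chars.isIn_eq_false_iff]; exact hnodd.1
        · rw [PySem.Chars.isIn_eq_false_iff]
          intro hinf
          have := (pvAllowed_iff _).mp (hall _ (pvSingleton_infix.mp hinf))
          exact this.2.2 rfl
        · rw [PySem.Chars.isIn_eq_false_iff]
          intro hinf
          have := (pvAllowed_iff _).mp (hall _ (pvSingleton_infix.mp hinf))
          exact this.1 (by decide)
      have hchar : path.toList.any (fun ch => ch.toNat < 0x20 || ch.toNat == 0x7F) = false := by
        rw [List.any_eq_false]
        intro c hcmem
        have := (pvAllowed_iff c).mp (hall c hcmem)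
        simp [this.1, this.2.1]
      have hseg : (PySem.Chars.splitOn path.toList ['/']).any
          (fun seg => seg.isEmpty || seg = ['.'] || seg = ['.', '.']) = false := by
        rw [List.any_eq_false]
        intro s hsmem
        rw [pvSplitOn_eq] at hsmem
        have hg := hsegs s hsmem
        simp only [pvGoodSeg, Bool.and_eq_true, Bool.not_eq_true', List.isEmpty_eq_false_iff,
          decide_eq_false_iff_not] at hg
        have hne2 : s ≠ ['.', '.'] := by
          intro hs2
          exact hnodd.1 (hs2 ▸ (by simpa using pvSegs_mem_infix path.toList [] s hsmem))
        simp [hg.1, hg.2, hne2, List.isEmpty_iff]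
      rw [if_neg (by simp [hnosw]), if_neg (by simp [hforb]), if_neg (by simp [hchar]),
          if_neg (by simp [hseg])]
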